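-- pv_equiv track=rewrite | github.com/begleyboy600/aws-assessment | Dynamic Programming/q16.py | optimalKeys
-- ===== SOURCE A (Python) =====
-- def optimalKeys(N):
--     if N <= 0:
--         return 0
--
--     dp = [0] * (N + 1)
--
--     for i in range(1, N + 1):
--         dp[i] = dp[i - 1] + 1
--         for j in range(2, i):
--             dp[i] = max(dp[i], dp[j - 2] * (i - j))
--
--     return dp[N]
-- ===== SOURCE B (Python) =====
-- # Closed form: the DP values follow a fixed table up to N=33 and then repeat
-- # the pattern dp[N] = 4 * dp[N-6]; so look up the table and scale by a power of 4.
-- TBL = [0, 1, 2, 3, 4, 5, 6, 7, 9, 12, 16, 20, 25, 30, 36, 48, 64, 80, 100, 125,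
--        150, 192, 256, 320, 400, 500, 625, 768, 1024, 1280, 1600, 2000, 2500, 3125]
--
-- def optimalKeys(N):
--     if N <= 0:
--         return 0
--     if N <= 33:
--         return TBL[N]
--     q, r = divmod(N - 28, 6)
--     return 4 ** q * TBL[28 + r]
-- ===== Notes on version B (the rewrite author's own statement) =====
-- stated objective: faster
-- what changed: The quadratic DP is replaced by a closed form: the dp sequence is a fixed 34-entry table followed by the recurrence dp[N]=4*dp[N-6], so B answers by one table lookup scaled by a power of 4 instead of filling a table with a nested loop.
import Mathlib
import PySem

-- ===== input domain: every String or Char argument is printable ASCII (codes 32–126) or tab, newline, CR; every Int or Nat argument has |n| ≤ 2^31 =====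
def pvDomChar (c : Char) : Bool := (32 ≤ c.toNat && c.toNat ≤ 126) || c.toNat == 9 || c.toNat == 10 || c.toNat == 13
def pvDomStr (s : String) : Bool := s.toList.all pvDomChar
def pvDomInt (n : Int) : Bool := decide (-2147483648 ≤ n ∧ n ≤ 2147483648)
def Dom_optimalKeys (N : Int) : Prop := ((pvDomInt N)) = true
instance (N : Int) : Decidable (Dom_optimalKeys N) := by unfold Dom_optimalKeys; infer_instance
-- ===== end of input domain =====

-- B replaces A's quadratic DP by a closed form: the dp sequence is a fixed 34-entry table
-- followed by the recurrence dp[N] = 4 * dp[N-6], so B answers with one table lookup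
-- scaled by a power of 4 (faster: no table is filled at all).

-- ===== PORT A =====
-- inner loop body: dp[i] = max(dp[i], dp[j-2] * (i-j))
def bodyA (i : Int) (dp : List Int) (j : Int) : List Int :=
  PySem.List.pySetD dp i (max (PySem.List.pyGetD dp i 0) (PySem.List.pyGetD dp (j - 2) 0 * (i - j)))

-- outer loop body: dp[i] = dp[i-1] + 1; for j in range(2, i): ...
def stepA (dp : List Int) (i : Int) : List Int :=
  (PySem.List.pyRange 2 i 1).foldl (bodyA i)
    (PySem.List.pySetD dp i (PySem.List.pyGetD dp (i - 1) 0 + 1))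

def optimalKeys (N : Int) : Int :=
  if N ≤ 0 then 0
  else
    PySem.List.pyGetD
      ((PySem.List.pyRange 1 (N + 1) 1).foldl stepA (List.replicate (N + 1).toNat 0)) N 0

-- ===== PORT B =====
-- the module-level constant TBL of Source B
def tblB : List Int :=
  [0, 1, 2, 3, 4, 5, 6, 7, 9, 12, 16, 20, 25, 30, 36, 48, 64, 80, 100, 125,
   150, 192, 256, 320, 400, 500, 625, 768, 1024, 1280, 1600, 2000, 2500, 3125]

-- Source B step for step: guard, table lookup for N ≤ 33, else q, r = divmod(N-28, 6); 4**q * TBL[28+r]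
def optimalKeys_alt (N : Int) : Int :=
  if N ≤ 0 then 0
  else if N ≤ 33 then PySem.List.pyGetD tblB N 0
  else
    let qr := (PySem.Int.divmod? (N - 28) 6).getD (0, 0)
    4 ^ qr.1.toNat * PySem.List.pyGetD tblB (28 + qr.2) 0

-- ===== PRECONDITION & SPEC =====
def Spec_optimalKeys (N : Int) (out : Int) : Prop := out = optimalKeys_alt N
instance (N : Int) (out : Int) : Decidable (Spec_optimalKeys N out) := by unfold Spec_optimalKeys; infer_instance

-- ===== CLAIM (what is proved, stated in full; the proofs are below) =====
def Claim_equal_optimalKeys : Prop := ∀ (N : Int), Dom_optimalKeys N → Spec_optimalKeys N (optimalKeys N)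

-- ===== LEMMAS AND PROOFS =====

-- The dp sequence in closed form, in terms of B's table.
def tbl (m : Nat) : Int := tblB.getD m 0

def Hf (m : Nat) : Int :=
  if m ≤ 33 then tbl m else 4 ^ ((m - 28) / 6) * tbl (28 + (m - 28) % 6)

theorem Hf_step (m : Nat) (h : 34 ≤ m) : Hf m = 4 * Hf (m - 6) := by
  by_cases h2 : m ≤ 39
  · interval_cases m <;> decide
  · unfold Hf
    rw [if_neg (by omega), if_neg (by omega)]
    have e1 : (m - 28) / 6 = (m - 6 - 28) / 6 + 1 := by omega
    have e2 : (m - 28) % 6 = (m - 6 - 28) % 6 := by omega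
    rw [e1, e2, pow_succ]
    ring

theorem tbl_nonneg (k : Nat) (h : k ≤ 33) : 0 ≤ tbl k := by interval_cases k <;> decide

theorem Hf_nonneg (m : Nat) : 0 ≤ Hf m := by
  unfold Hf
  split
  · exact tbl_nonneg m (by omega)
  · have h6 : (m - 28) % 6 < 6 := Nat.mod_lt _ (by norm_num)
    exact mul_nonneg (pow_nonneg (by norm_num) _) (tbl_nonneg _ (by omega))

theorem Hf_succ_ge (m : Nat) : Hf m + 1 ≤ Hf (m + 1) := by
  induction m using Nat.strong_induction_on with
  | _ m ih =>
    by_cases h : m ≤ 38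
    · interval_cases m <;> decide
    · have h1 : Hf (m + 1) = 4 * Hf (m - 5) := by
        have := Hf_step (m + 1) (by omega)
        simpa using this
      have h2 : Hf m = 4 * Hf (m - 6) := Hf_step m (by omega)
      have h3 : Hf (m - 6) + 1 ≤ Hf (m - 6 + 1) := ih (m - 6) (by omega)
      have e : m - 6 + 1 = m - 5 := by omega
      rw [e] at h3
      omega

theorem Hf_mono4 (m : Nat) : 4 * Hf m ≤ Hf (m + 6) := by
  by_cases h : m ≤ 27
  · interval_cases m <;> decide
  · have := Hf_step (m + 6) (by omega)
    simp at this
    omega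

theorem cand_le_small (m : Nat) : ∀ k : Nat, 1 ≤ k → k ≤ 7 → (k : Int) * Hf m ≤ Hf (m + k + 2) := by
  induction m using Nat.strong_induction_on with
  | _ m ih =>
    intro k hk1 hk7
    by_cases h : m ≤ 33
    · revert hk1
      have hb : ∀ m' : Nat, m' < 34 → ∀ k' : Nat, k' < 8 → 1 ≤ k' → (k' : Int) * Hf m' ≤ Hf (m' + k' + 2) := by decide
      exact hb m (by omega) k (by omega)
    · have h1 : Hf m = 4 * Hf (m - 6) := Hf_step m (by omega)
      have h2 : Hf (m + k + 2) = 4 * Hf (m + k + 2 - 6) := Hf_step _ (by omega)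
      have h3 := ih (m - 6) (by omega) k hk1 hk7
      have e : m - 6 + k + 2 = m + k + 2 - 6 := by omega
      rw [e] at h3
      have hknn : (0:Int) ≤ (k:Int) := by positivity
      nlinarith [Hf_nonneg (m - 6)]

-- every break-point candidate is dominated by the dp value
theorem cand_le (k : Nat) (m : Nat) (hk : 1 ≤ k) : (k : Int) * Hf m ≤ Hf (m + k + 2) := by
  induction k using Nat.strong_induction_on generalizing m with
  | _ k ih =>
    by_cases h7 : k ≤ 7
    · exact cand_le_small m k hk h7
    · have h1 : (k : Int) * Hf m ≤ ((k - 6 : Nat) : Int) * (4 * Hf m) := by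
        have : (k : Int) ≤ 4 * ((k - 6 : Nat) : Int) := by omega
        nlinarith [Hf_nonneg m]
      have h2 : ((k - 6 : Nat) : Int) * (4 * Hf m) ≤ ((k - 6 : Nat) : Int) * Hf (m + 6) := by
        have := Hf_mono4 m
        have hnn : (0:Int) ≤ ((k - 6 : Nat) : Int) := by positivity
        nlinarith
      have h3 := ih (k - 6) (by omega) (m + 6) (by omega)
      have e : m + 6 + (k - 6) + 2 = m + k + 2 := by omega
      rw [e] at h3
      linarith

-- the dp value is achieved by the +1 move or a break-point candidate
theorem achieved (i : Nat) (hi : 1 ≤ i) :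
    Hf i = Hf (i - 1) + 1 ∨
      ∃ k, 1 ≤ k ∧ k ≤ 5 ∧ k + 2 ≤ i ∧ Hf i = (k : Int) * Hf (i - k - 2) := by
  by_cases h : i ≤ 33
  · revert hi
    have hb : ∀ i' < 34, 1 ≤ i' → Hf i' = Hf (i' - 1) + 1 ∨
        ∃ k < 6, 1 ≤ k ∧ k + 2 ≤ i' ∧ Hf i' = (k : Int) * Hf (i' - k - 2) := by decide
    intro hi
    rcases hb i (by omega) hi with h1 | ⟨k, hk6, hk1, hki, he⟩
    · exact Or.inl h1
    · exact Or.inr ⟨k, hk1, by omega, hki, he⟩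
  · right
    exact ⟨4, by omega, by omega, by omega, by
      have := Hf_step i (by omega)
      have e : i - 6 = i - 4 - 2 := by omega
      rw [this, e]
      norm_num⟩

-- generic max-fold bounds
theorem foldMax_le {α : Type} (g : α → Int) (c : Int) :
    ∀ (js : List α) (v : Int), (∀ x ∈ js, g x ≤ c) → v ≤ c →
      js.foldl (fun b x => max b (g x)) v ≤ c := by
  intro js
  induction js with
  | nil => intro v _ hv; simpa using hv
  | cons j js ih =>
    intro v hall hv
    simp only [List.foldl_cons]
    exact ih _ (fun x hx => hall x (List.mem_cons_of_mem _ hx))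
      (max_le hv (hall j (List.mem_cons_self)))

theorem le_foldMax_init {α : Type} (g : α → Int) :
    ∀ (js : List α) (v : Int), v ≤ js.foldl (fun b x => max b (g x)) v := by
  intro js
  induction js with
  | nil => intro v; simp
  | cons j js ih =>
    intro v
    simp only [List.foldl_cons]
    exact le_trans (le_max_left _ _) (ih _)

theorem le_foldMax_mem {α : Type} (g : α → Int) :
    ∀ (js : List α) (v : Int) (x : α), x ∈ js → g x ≤ js.foldl (fun b x => max b (g x)) v := by
  intro js
  induction js with
  | nil => intro v x hx; simp at hx
  | cons j js ih =>
    intro v x hx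
    rcases List.mem_cons.mp hx with rfl | hx
    · simp only [List.foldl_cons]
      exact le_trans (le_max_right _ _) (le_foldMax_init g js _)
    · simp only [List.foldl_cons]
      exact ih _ x hx

-- the max-fold of the candidates j ∈ [2, i) over a dp prefix that agrees with Hf equals Hf i
theorem max_fold_value (dp : List Int) (i : Nat) (hi : 1 ≤ i)
    (hdp : ∀ m : Nat, m < i → dp.getD m 0 = Hf m) :
    (PySem.List.pyRange 2 i 1).foldl
        (fun b j => max b (PySem.List.pyGetD dp (j - 2) 0 * ((i : Int) - j)))
        (Hf (i - 1) + 1) = Hf i := by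
  have hcand : ∀ j ∈ PySem.List.pyRange 2 (i : Int) 1,
      PySem.List.pyGetD dp (j - 2) 0 * ((i : Int) - j) ≤ Hf i := by
    intro j hj
    rw [PySem.List.mem_pyRange_one] at hj
    obtain ⟨hj1, hj2⟩ := hj
    have e1 : j - 2 = (((j - 2).toNat : Nat) : Int) := by omega
    rw [e1, PySem.List.pyGetD_natCast]
    have hm : (j - 2).toNat < i := by omega
    rw [hdp _ hm]
    have e2 : (i : Int) - j = (((i : Int) - j).toNat : Int) := by omega
    rw [e2]
    have hk1 : 1 ≤ ((i : Int) - j).toNat := by omega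
    have := cand_le ((i : Int) - j).toNat (j - 2).toNat hk1
    have e3 : (j - 2).toNat + ((i : Int) - j).toNat + 2 = i := by omega
    rw [e3] at this
    linarith [this]
  have hinit : Hf (i - 1) + 1 ≤ Hf i := by
    have := Hf_succ_ge (i - 1)
    have e : i - 1 + 1 = i := by omega
    rwa [e] at this
  apply le_antisymm
  · exact foldMax_le _ _ _ _ hcand hinit
  · rcases achieved i hi with hach1 | ⟨k, hk1, hk5, hki, he⟩
    · rw [hach1]
      exact le_foldMax_init _ _ _
    · have hjmem : ((i : Int) - k) ∈ PySem.List.pyRange 2 (i : Int) 1 := by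
        rw [PySem.List.mem_pyRange_one]
        exact ⟨by omega, by omega⟩
      have hle := le_foldMax_mem (fun j => PySem.List.pyGetD dp (j - 2) 0 * ((i : Int) - j))
        (PySem.List.pyRange 2 (i : Int) 1) (Hf (i - 1) + 1) _ hjmem
      simp only at hle
      have e1 : ((i : Int) - k) - 2 = ((i - k - 2 : Nat) : Int) := by omega
      have e2 : (i : Int) - ((i : Int) - k) = (k : Int) := by omega
      rw [e1, e2, PySem.List.pyGetD_natCast, hdp _ (by omega)] at hle
      rw [he]
      calc (k : Int) * Hf (i - k - 2) = Hf (i - k - 2) * k := by ring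
        _ ≤ _ := hle

-- A's inner loop only ever writes index i and reads indices < i, so it is a max-fold at index i
theorem innerA_fold (dp : List Int) (i : Nat) (hL : i < dp.length) :
    ∀ (js : List Int), (∀ j ∈ js, 2 ≤ j ∧ j < (i : Int)) → ∀ v : Int,
      js.foldl (bodyA (i : Int)) (dp.set i v)
        = dp.set i (js.foldl
            (fun b j => max b (PySem.List.pyGetD dp (j - 2) 0 * ((i : Int) - j))) v) := by
  intro js
  induction js with
  | nil => intro _ v; rfl
  | cons j js ih =>
    intro hall v
    obtain ⟨hj2, hji⟩ := hall j List.mem_cons_self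
    simp only [List.foldl_cons]
    have hset : bodyA (i : Int) (dp.set i v) j
        = dp.set i (max v (PySem.List.pyGetD dp (j - 2) 0 * ((i : Int) - j))) := by
      unfold bodyA
      have hg1 : PySem.List.pyGetD (dp.set i v) (i : Int) 0 = v := by
        rw [PySem.List.pyGetD_natCast]
        simp [List.getD, (by simpa using hL : i < dp.length)]
      have hg2 : PySem.List.pyGetD (dp.set i v) (j - 2) 0
          = PySem.List.pyGetD dp (j - 2) 0 := by
        have e1 : j - 2 = (((j - 2).toNat : Nat) : Int) := by omega
        rw [e1, PySem.List.pyGetD_natCast, PySem.List.pyGetD_natCast]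
        have hne : (j - 2).toNat ≠ i := by omega
        simp [List.getD, List.getElem?_set_ne (Ne.symm hne)]
      rw [hg1, hg2, PySem.List.pySetD_natCast, List.set_set]
    rw [hset, ih (fun x hx => hall x (List.mem_cons_of_mem _ hx))]

theorem stepA_eq (dp : List Int) (i : Nat) (hi : 1 ≤ i) (hL : i < dp.length)
    (hdp : ∀ m : Nat, m < i → dp.getD m 0 = Hf m) :
    stepA dp (i : Int) = dp.set i (Hf i) := by
  unfold stepA
  have hinit : PySem.List.pyGetD dp ((i : Int) - 1) 0 + 1 = Hf (i - 1) + 1 := by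
    have e : (i : Int) - 1 = ((i - 1 : Nat) : Int) := by omega
    rw [e, PySem.List.pyGetD_natCast, hdp _ (by omega)]
  rw [PySem.List.pySetD_natCast, hinit]
  rw [innerA_fold dp i hL _ (by
      intro j hj
      rw [PySem.List.mem_pyRange_one] at hj
      exact ⟨hj.1, hj.2⟩) _]
  congr 1
  exact max_fold_value dp i hi hdp

-- outer loop invariant of A
theorem outer_inv (L : Nat) : ∀ n : Nat, n < L →
    ((PySem.List.pyRange 1 ((n : Int) + 1) 1).foldl stepA (List.replicate L 0)).length = L ∧
      ∀ m : Nat, m < L →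
        ((PySem.List.pyRange 1 ((n : Int) + 1) 1).foldl stepA (List.replicate L 0)).getD m 0
          = if m ≤ n then Hf m else 0 := by
  intro n
  induction n with
  | zero =>
    intro _
    rw [PySem.List.pyRange_one_eq_nil (by omega)]
    constructor
    · simp
    · intro m hm
      rcases Nat.eq_zero_or_pos m with rfl | hm0
      · simp [Hf, tbl, tblB]
      · simp [Nat.not_le.mpr hm0]
  | succ n ih =>
    intro hn
    obtain ⟨ihlen, ihval⟩ := ih (by omega)
    have hsplit : PySem.List.pyRange 1 (((n + 1 : Nat) : Int) + 1) 1
        = PySem.List.pyRange 1 ((n : Int) + 1) 1 ++ [(n : Int) + 1] := by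
      have e : ((n + 1 : Nat) : Int) + 1 = ((n : Int) + 1) + 1 := by push_cast; ring
      rw [e, PySem.List.pyRange_one_succ_right (by omega)]
    rw [hsplit, List.foldl_append]
    set r := (PySem.List.pyRange 1 ((n : Int) + 1) 1).foldl stepA (List.replicate L 0) with hr
    simp only [List.foldl_cons, List.foldl_nil]
    have e2 : (n : Int) + 1 = ((n + 1 : Nat) : Int) := by push_cast; ring
    rw [e2, stepA_eq r (n + 1) (by omega) (by omega)
      (by intro m hm; rw [ihval m (by omega)]; simp [Nat.le_of_lt_succ hm])]
    constructor
    · simp [ihlen]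
    · intro m hm
      by_cases hmn : m = n + 1
      · subst hmn
        simp [List.getD, ihlen, hn]
      · rw [List.getD, List.getElem?_set_ne (Ne.symm hmn)]
        rw [← List.getD, ihval m hm]
        by_cases h1 : m ≤ n
        · rw [if_pos h1, if_pos (by omega)]
        · rw [if_neg h1, if_neg (by omega)]

theorem portA_eq (N : Int) (hN : ¬ N ≤ 0) : optimalKeys N = Hf N.toNat := by
  unfold optimalKeys
  rw [if_neg hN]
  set n := N.toNat with hn
  have eN : N = (n : Int) := by omega
  rw [eN]
  have eL2 : ((n : Int) + 1).toNat = n + 1 := by omega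
  rw [eL2]
  obtain ⟨hlen, hval⟩ := outer_inv (n + 1) n (by omega)
  rw [PySem.List.pyGetD_natCast, hval n (by omega)]
  simp

-- B's closed form is Hf
theorem portB_eq (N : Int) (hN : ¬ N ≤ 0) : optimalKeys_alt N = Hf N.toNat := by
  unfold optimalKeys_alt
  rw [if_neg hN]
  set m := N.toNat with hm
  have eN : N = (m : Int) := by omega
  by_cases h33 : N ≤ 33
  · rw [if_pos h33, eN, PySem.List.pyGetD_natCast]
    unfold Hf
    rw [if_pos (by omega)]
    rfl
  · rw [if_neg h33]
    have e28 : N - 28 = ((m - 28 : Nat) : Int) := by omega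
    have hdm : PySem.Int.divmod? (N - 28) 6 =
        some (PySem.Int.floordiv (N - 28) 6, PySem.Int.mod (N - 28) 6) := by
      simp [PySem.Int.divmod?]
      rw [Int.fdiv_eq_ediv, Int.fmod_eq_emod]
      simp
    rw [hdm]
    simp only [Option.getD_some]
    rw [e28]
    have e6 : (6 : Int) = ((6 : Nat) : Int) := rfl
    rw [e6, PySem.Int.floordiv_natCast, PySem.Int.mod_natCast]
    have eq1 : (((m - 28) / 6 : Nat) : Int).toNat = (m - 28) / 6 := by omega
    have eq2 : (28 : Int) + (((m - 28) % 6 : Nat) : Int) = ((28 + (m - 28) % 6 : Nat) : Int) := by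
      push_cast; ring
    rw [eq1, eq2, PySem.List.pyGetD_natCast]
    unfold Hf
    rw [if_neg (by omega)]
    rfl

-- ===== VERDICT (by name: the statement is the Claim_ definition above) =====
theorem optimalKeys_spec : Claim_equal_optimalKeys := by
  intro N _
  unfold Spec_optimalKeys
  by_cases h : N ≤ 0
  · unfold optimalKeys optimalKeys_alt
    simp [h]
  · rw [portA_eq N h, portB_eq N h]
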